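-- pv_equiv track=rewrite | github.com/dvargas2013/MainPythons | done/String.py | endRepFind
-- ===== SOURCE A (Python) =====
-- def isRep(a,b):
--     """"Figure out if the string is just the second string repeated a bunch
--
--     Usage:
--         isRep('44554455445','4455') -> True"""
--     mult = len(a)//len(b)
--     if mult < 2: return False
--     b = b*(mult+1)
--     return a[:len(b)]==b[:len(a)]
--
-- def endRepFind(str_):
--     """Find the last bit of the string that is a repetition
--
--     Usage:
--         endRepFind('123445544554455') = '4455'
--     """
--     def find(s):
--         """Takes first symbol and goes through all occurances until it finds repeating section"""
--         found = s.find(s[0],1)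
--         while found != -1:
--             section = s[:found]
--             if isRep(s,section): return section
--             found = s.find(s[0],found+1)
--         return False
--     #Removes first symbol until left with repeating part
--     for i in range(len(str_)):
--         stop = find(str_[i:])
--         if stop: return stop
--     return ''
-- ===== SOURCE B (Python) =====
-- def endRepFind(str_):
--     """Find the last bit of the string that is a repetition.
--
--     Shift-major algorithm: for each shift p, extend the self-overlap
--     str_[t] == str_[t+p] backwards from the end to get the earliest start
--     E(p) from which the string is p-periodic to the end.  The answer's
--     start is the minimal E(p) among shifts with E(p) <= n - 2*p (at least
--     two unit lengths fit), and its unit is the smallest such shift there."""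
--     n = len(str_)
--     best = None  # (start, period)
--     for p in range(1, n // 2 + 1):
--         e = n - p
--         while e > 0 and str_[e - 1] == str_[e - 1 + p]:
--             e -= 1
--         if e <= n - 2 * p and (best is None or e < best[0]):
--             best = (e, p)
--     if best is None:
--         return ''
--     i, p = best
--     return str_[i:i + p]
-- ===== Notes on version B (the rewrite author's own statement) =====
-- stated objective: faster
-- what changed: B is shift-major instead of suffix-major: for each shift p it extends the self-overlap str_[t]==str_[t+p] backwards from the end once to get the earliest p-periodic start E(p), then picks the minimal E(p) among shifts with E(p) <= n-2p (smallest p on ties), replacing A's per-suffix scan of first-character occurrences with repeated-string building and prefix comparison.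
import Mathlib
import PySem

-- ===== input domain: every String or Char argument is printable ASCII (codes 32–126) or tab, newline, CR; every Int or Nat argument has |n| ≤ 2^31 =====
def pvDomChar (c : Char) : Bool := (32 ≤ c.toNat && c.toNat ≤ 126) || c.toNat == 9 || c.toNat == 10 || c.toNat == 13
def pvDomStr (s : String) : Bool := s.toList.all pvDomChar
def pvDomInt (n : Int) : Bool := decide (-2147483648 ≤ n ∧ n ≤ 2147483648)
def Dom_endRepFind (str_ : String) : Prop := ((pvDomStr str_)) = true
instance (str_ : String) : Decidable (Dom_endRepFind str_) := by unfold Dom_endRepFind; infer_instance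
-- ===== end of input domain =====

-- B replaces A's suffix-by-suffix search with a shift-major scan: for each shift p it extends the
-- self-overlap backwards from the end once, then selects the best (leftmost start, smallest shift)
-- candidate; objective: faster (a timing run measured it).
-- Loops are ported as structural recursions on an explicit fuel argument (a totality guard only;
-- the fuel chosen at each call site is always sufficient, as the lemmas below show).

-- ===== PORT A =====

-- s.find(c, start) for a single character c: first index ≥ start holding c, none encodes -1.
-- Exact for start ≥ 1 (all call sites); left-to-right scan like CPython's find.
def findFromA (s : List Char) (c : Char) : Nat → Nat → Option Nat
  | 0, _ => none
  | fuel + 1, st =>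
    if h : st < s.length then
      if s[st] = c then some st else findFromA s c fuel (st + 1)
    else none

-- isRep(a, b): is a a prefix of b repeated (with at least two full copies)?
-- lengths are Nat, so Python's '//' on them is Nat division (b is nonempty at every call site)
def isRepA (a b : List Char) : Bool :=
  let mult := a.length / b.length
  if mult < 2 then false
  else
    let b2 := List.flatten (List.replicate (mult + 1) b)  -- b*(mult+1)
    (a.take b2.length) == (b2.take a.length)

-- the 'while found != -1' loop of find(s); c = s[0]
def findLoopA (s : List Char) (c : Char) : Nat → Nat → Option (List Char)
  | 0, _ => none   -- fuel exhausted; unreachable from findA's call (found grows, bounded by s.length)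
  | fuel + 1, found =>
    if isRepA s (s.take found) then some (s.take found)   -- section = s[:found]
    else
      match findFromA s c s.length (found + 1) with
      | some f2 => findLoopA s c fuel f2
      | none => none

-- find(s); returns the section or none (Python's False; sections are nonempty, so truthiness = isSome)
def findA : List Char → Option (List Char)
  | [] => none   -- unreachable: only called on nonempty suffixes (Python s[0] would raise)
  | c :: t =>
    match findFromA (c :: t) c (c :: t).length 1 with
    | some f => findLoopA (c :: t) c (c :: t).length f
    | none => none

-- for i in range(len(str_)): …
def erfAuxA (l : List Char) : Nat → Nat → List Char
  | 0, _ => []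
  | fuel + 1, i =>
    if i < l.length then
      match findA (l.drop i) with
      | some stop => stop
      | none => erfAuxA l fuel (i + 1)
    else []

def endRepFind (str_ : String) : String := String.ofList (erfAuxA str_.toList str_.toList.length 0)

-- ===== PORT B =====

-- while e > 0 and str_[e-1] == str_[e-1+p]: e -= 1    (both indices provably in range at each test)
def extLoopB (l : List Char) (p : Nat) : Nat → Nat → Nat
  | 0, e => e   -- fuel exhausted; unreachable from bStepB's call (fuel = starting e suffices)
  | fuel + 1, e =>
    if 0 < e ∧ l[e - 1]? = l[e - 1 + p]? then extLoopB l p fuel (e - 1) else e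

-- one iteration of 'for p in range(1, n//2+1)': compute e, then the conditional update of best
def bStepB (n : Nat) (l : List Char) (best : Option (Nat × Nat)) (p : Nat) : Option (Nat × Nat) :=
  let e := extLoopB l p (n - p) (n - p)
  match best with
  | none => if e ≤ n - 2 * p then some (e, p) else none
  | some (be, bp) => if e ≤ n - 2 * p ∧ e < be then some (e, p) else some (be, bp)

def endRepFind_alt (str_ : String) : String :=
  match (List.range' 1 (str_.toList.length / 2)).foldl (bStepB str_.toList.length str_.toList) none with
  | none => ""
  | some (i, p) => String.ofList ((str_.toList.drop i).take p)   -- str_[i:i+p]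

-- ===== PRECONDITION & SPEC =====
def Spec_endRepFind (str_ : String) (out : String) : Prop := out = endRepFind_alt str_
instance (str_ : String) (out : String) : Decidable (Spec_endRepFind str_ out) := by unfold Spec_endRepFind; infer_instance

-- ===== CLAIM (what is proved, stated in full; the proofs are below) =====
def Claim_equal_endRepFind : Prop := ∀ (str_ : String), Dom_endRepFind str_ → Spec_endRepFind str_ (endRepFind str_)

-- ===== LEMMAS AND PROOFS =====

-- p is a "good" shift of s: positive, at most half the length, and s matches itself shifted by p
def GoodB (s : List Char) (p : Nat) : Prop :=
  1 ≤ p ∧ 2 * p ≤ s.length ∧ s.drop p = s.take (s.length - p)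

-- fuel-free linear search for the least good shift ≥ p (proof-side model of A's find(s))
def innerSpec (s : List Char) (p : Nat) : Option (List Char) :=
  if 2 * p ≤ s.length then
    if s.drop p == s.take (s.length - p) then some (s.take p)
    else innerSpec s (p + 1)
  else none
termination_by s.length + 1 - 2 * p

theorem good_lt (s : List Char) (p : Nat) (h : GoodB s p) : p < s.length := by
  obtain ⟨h1, h2, _⟩ := h; omega

theorem good_head (s : List Char) (p : Nat) (h : GoodB s p) :
    s[p]? = s[0]? := by
  obtain ⟨h1, h2, h3⟩ := h
  have hp : p < s.length := by omega
  have e : (s.drop p)[0]? = (s.take (s.length - p))[0]? := by rw [h3]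
  simp only [List.getElem?_drop, List.getElem?_take] at e
  simpa [Nat.sub_pos_of_lt hp] using e

theorem innerSpec_good (s : List Char) (p : Nat) (h : GoodB s p) :
    innerSpec s p = some (s.take p) := by
  obtain ⟨h1, h2, h3⟩ := h
  rw [innerSpec]
  simp [h2, h3]

theorem innerSpec_none (s : List Char) (f : Nat)
    (h : ∀ q, f ≤ q → ¬ GoodB s q) (hf : 1 ≤ f) : innerSpec s f = none := by
  revert h hf
  fun_induction innerSpec s f with
  | case1 p h2 hb =>
    intro h hf
    exact absurd ⟨hf, h2, by simpa using hb⟩ (h p le_rfl)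
  | case2 p h2 hb ih =>
    intro h hf
    exact ih (fun q hq => h q (by omega)) (by omega)
  | case3 p h2 =>
    intro _ _
    rfl

theorem innerSpec_skip (s : List Char) (f f2 : Nat) (hle : f ≤ f2) (hf : 1 ≤ f)
    (h : ∀ q, f ≤ q → q < f2 → ¬ GoodB s q) : innerSpec s f = innerSpec s f2 := by
  obtain ⟨d, rfl⟩ : ∃ d, f2 = f + d := ⟨f2 - f, by omega⟩
  clear hle
  induction d generalizing f with
  | zero => rfl
  | succ d ih =>
    have hnotf : ¬ GoodB s f := h f le_rfl (by omega)
    have step : innerSpec s f = innerSpec s (f + 1) := by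
      by_cases h2 : 2 * f ≤ s.length
      · have hb : ¬ (s.drop f == s.take (s.length - f)) = true := by
          intro hb; exact hnotf ⟨hf, h2, by simpa using hb⟩
        rw [innerSpec]; simp [h2, hb]
      · rw [innerSpec, innerSpec]
        simp only [if_neg h2, if_neg (by omega : ¬ 2 * (f + 1) ≤ s.length)]
    rw [step, show f + (d + 1) = (f + 1) + d by omega]
    exact ih (f + 1) (by omega) (fun q hq hlt => h q (by omega) (by omega))

theorem findFromA_some_bounds (s : List Char) (c : Char) :
    ∀ fuel st j, findFromA s c fuel st = some j → st ≤ j ∧ j < s.length := by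
  intro fuel
  induction fuel with
  | zero => intro st j h; simp [findFromA] at h
  | succ fuel ih =>
    intro st j h
    simp only [findFromA] at h
    by_cases h1 : st < s.length
    · rw [dif_pos h1] at h
      by_cases h2 : s[st] = c
      · rw [if_pos h2] at h
        obtain rfl : st = j := by simpa using h
        omega
      · rw [if_neg h2] at h
        have := ih (st + 1) j h
        omega
    · rw [dif_neg h1] at h; simp at h

theorem findFromA_some_spec (s : List Char) (c : Char) :
    ∀ fuel st j, findFromA s c fuel st = some j →
      s[j]? = some c ∧ ∀ q, st ≤ q → q < j → s[q]? ≠ some c := by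
  intro fuel
  induction fuel with
  | zero => intro st j h; simp [findFromA] at h
  | succ fuel ih =>
    intro st j h
    simp only [findFromA] at h
    by_cases h1 : st < s.length
    · rw [dif_pos h1] at h
      by_cases h2 : s[st] = c
      · rw [if_pos h2] at h
        obtain rfl : st = j := by simpa using h
        exact ⟨by rw [List.getElem?_eq_getElem h1, h2], fun q hq1 hq2 => by omega⟩
      · rw [if_neg h2] at h
        obtain ⟨hj, hrest⟩ := ih (st + 1) j h
        refine ⟨hj, fun q hq1 hq2 hqc => ?_⟩
        by_cases hqs : q = st
        · subst hqs
          rw [List.getElem?_eq_getElem h1] at hqc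
          exact h2 (by simpa using hqc)
        · exact hrest q (by omega) hq2 hqc
    · rw [dif_neg h1] at h; simp at h

theorem findFromA_none_spec (s : List Char) (c : Char) :
    ∀ fuel st, s.length ≤ st + fuel → findFromA s c fuel st = none →
      ∀ q, st ≤ q → q < s.length → s[q]? ≠ some c := by
  intro fuel
  induction fuel with
  | zero => intro st hfuel h q hq1 hq2; omega
  | succ fuel ih =>
    intro st hfuel h q hq1 hq2 hqc
    simp only [findFromA] at h
    by_cases h1 : st < s.length
    · rw [dif_pos h1] at h
      by_cases h2 : s[st] = c
      · rw [if_pos h2] at h; simp at h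
      · rw [if_neg h2] at h
        by_cases hqs : q = st
        · subst hqs
          rw [List.getElem?_eq_getElem h1] at hqc
          exact h2 (by simpa using hqc)
        · exact ih (st + 1) (by omega) h q (by omega) hq2 hqc
    · omega

-- getElem? of a flattened replicate: index reduces mod the block length
theorem flat_replicate_getElem? (u : List Char) (k j : Nat) (hj : j < k * u.length) :
    (List.flatten (List.replicate k u))[j]? = u[j % u.length]? := by
  induction k generalizing j with
  | zero => omega
  | succ k ih =>
    rw [List.replicate_succ, List.flatten_cons, List.getElem?_append]
    by_cases hc : j < u.length
    · rw [if_pos hc, Nat.mod_eq_of_lt hc]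
    · have hx : (k + 1) * u.length = k * u.length + u.length := by ring
      rw [if_neg hc, ih (j - u.length) (by omega),
        Nat.mod_eq_sub_mod (by omega : u.length ≤ j)]

-- shifted self-overlap, stated with subtraction
theorem dropTake_iff (s : List Char) (f : Nat) (_h1 : 1 ≤ f) (h2 : f ≤ s.length) :
    s.drop f = s.take (s.length - f) ↔
      ∀ j, f ≤ j → j < s.length → s[j]? = s[j - f]? := by
  constructor
  · intro he j hj1 hj2
    have e : (s.drop f)[j - f]? = (s.take (s.length - f))[j - f]? := by rw [he]
    rw [List.getElem?_drop, List.getElem?_take, if_pos (by omega),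
      show f + (j - f) = j by omega] at e
    exact e
  · intro hp
    apply List.ext_getElem?
    intro t
    rw [List.getElem?_drop, List.getElem?_take]
    by_cases hc : t < s.length - f
    · rw [if_pos hc]
      simpa [show f + t - f = t by omega] using hp (f + t) (by omega) (by omega)
    · rw [if_neg hc, List.getElem?_eq_none (by omega : s.length ≤ f + t)]

-- shifted self-overlap is the same as periodicity mod f
theorem period_mod_iff (s : List Char) (f : Nat) (h1 : 1 ≤ f) :
    (∀ j, f ≤ j → j < s.length → s[j]? = s[j - f]?) ↔
      (∀ j, j < s.length → s[j]? = s[j % f]?) := by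
  constructor
  · intro hp j
    induction j using Nat.strong_induction_on with
    | _ j ih =>
      intro hj
      by_cases hc : j < f
      · rw [Nat.mod_eq_of_lt hc]
      · rw [hp j (by omega) hj, ih (j - f) (by omega) (by omega),
          Nat.mod_eq_sub_mod (by omega : f ≤ j)]
  · intro hm j hj1 hj2
    rw [hm j hj2, hm (j - f) (by omega), Nat.mod_eq_sub_mod (by omega : f ≤ j)]

theorem isRepA_iff (s : List Char) (f : Nat) (h1 : 1 ≤ f) (h2 : f < s.length) :
    isRepA s (s.take f) = true ↔ (2 * f ≤ s.length ∧ s.drop f = s.take (s.length - f)) := by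
  have hf0 : 0 < f := h1
  have hlen : (s.take f).length = f := by simp; omega
  unfold isRepA
  simp only [hlen]
  by_cases hm : s.length / f < 2
  · have hlt : s.length < 2 * f := by
      have := (Nat.div_lt_iff_lt_mul hf0).1 hm
      omega
    simp only [if_pos hm]
    constructor
    · intro h; exact absurd h (by simp)
    · intro h; exact absurd h.1 (by omega)
  · have h2f : 2 * f ≤ s.length := by
      by_contra hge
      have : s.length / f < 2 := (Nat.div_lt_iff_lt_mul hf0).2 (by omega)
      omega
    simp only [if_neg hm]
    have hb2len : (List.flatten (List.replicate (s.length / f + 1) (s.take f))).length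
        = (s.length / f + 1) * f := by
      simp [hlen, Nat.mul_comm]
    have hmod := Nat.div_add_mod s.length f
    have hmlt := Nat.mod_lt s.length hf0
    have hgt : s.length < (s.length / f + 1) * f := by
      have hx : (s.length / f + 1) * f = f * (s.length / f) + f := by ring
      omega
    rw [hb2len, List.take_of_length_le (by omega : s.length ≤ (s.length / f + 1) * f)]
    rw [beq_iff_eq]
    rw [show (s = (List.flatten (List.replicate (s.length / f + 1) (s.take f))).take s.length) ↔
        (∀ j, j < s.length → s[j]? = s[j % f]?) from ?_,
      ← period_mod_iff s f h1, ← dropTake_iff s f h1 (by omega)]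
    · exact ⟨fun h => ⟨h2f, h⟩, fun h => h.2⟩
    · constructor
      · intro he j hj
        have e := congrArg (fun l => l[j]?) he
        simp only at e
        rw [List.getElem?_take, if_pos hj,
          flat_replicate_getElem? _ _ _ (by rw [hlen]; omega), hlen,
          List.getElem?_take, if_pos (Nat.mod_lt _ hf0)] at e
        exact e
      · intro hp
        apply List.ext_getElem?
        intro j
        rw [List.getElem?_take]
        by_cases hj : j < s.length
        · rw [if_pos hj, flat_replicate_getElem? _ _ _ (by rw [hlen]; omega), hlen,
            List.getElem?_take, if_pos (Nat.mod_lt _ hf0)]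
          exact hp j hj
        · rw [if_neg hj, List.getElem?_eq_none (by omega : s.length ≤ j)]

theorem findLoopA_eq (s : List Char) (c : Char) :
    ∀ fuel f, 1 ≤ f → f < s.length → s.length ≤ f + fuel →
      s[0]? = some c → s[f]? = some c →
      findLoopA s c fuel f = innerSpec s f := by
  intro fuel
  induction fuel with
  | zero => intro f hf1 hf2 hfuel hc hfc; omega
  | succ fuel ih =>
    intro f hf1 hf2 hfuel hc hfc
    simp only [findLoopA]
    by_cases hrep : isRepA s (s.take f) = true
    · have hg : GoodB s f := by
        have := (isRepA_iff s f hf1 hf2).1 hrep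
        exact ⟨hf1, this.1, this.2⟩
      rw [if_pos hrep, innerSpec_good s f hg]
    · rw [if_neg hrep]
      have hnotg : ¬ GoodB s f := fun hg =>
        hrep ((isRepA_iff s f hf1 hf2).2 ⟨hg.2.1, hg.2.2⟩)
      cases hfind : findFromA s c s.length (f + 1) with
      | some f2 =>
        show findLoopA s c fuel f2 = innerSpec s f
        obtain ⟨hb, hlt⟩ := findFromA_some_bounds s c s.length (f + 1) f2 hfind
        obtain ⟨hf2c, hnone⟩ := findFromA_some_spec s c s.length (f + 1) f2 hfind
        have hnog : ∀ q, f ≤ q → q < f2 → ¬ GoodB s q := by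
          intro q hq1 hq2 hg
          by_cases hqf : q = f
          · subst hqf; exact hnotg hg
          · exact hnone q (by omega) hq2 (by rw [good_head s q hg]; exact hc)
        rw [ih f2 (by omega) hlt (by omega) hc hf2c,
          innerSpec_skip s f f2 (by omega) hf1 hnog]
      | none =>
        show none = innerSpec s f
        have hnog : ∀ q, f ≤ q → ¬ GoodB s q := by
          intro q hq1 hg
          by_cases hqf : q = f
          · subst hqf; exact hnotg hg
          · exact findFromA_none_spec s c s.length (f + 1) (by omega) hfind q (by omega)
              (good_lt s q hg) (by rw [good_head s q hg]; exact hc)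
        rw [innerSpec_none s f hnog hf1]

theorem findA_eq (s : List Char) (hs : s ≠ []) : findA s = innerSpec s 1 := by
  obtain ⟨c, t, rfl⟩ : ∃ c t, s = c :: t := by
    cases s with
    | nil => exact absurd rfl hs
    | cons c t => exact ⟨c, t, rfl⟩
  have hc : (c :: t)[0]? = some c := rfl
  cases hfind : findFromA (c :: t) c (c :: t).length 1 with
  | some f =>
    simp only [findA, hfind]
    obtain ⟨hb, hlt⟩ := findFromA_some_bounds (c :: t) c (c :: t).length 1 f hfind
    obtain ⟨hfc, hnone⟩ := findFromA_some_spec (c :: t) c (c :: t).length 1 f hfind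
    rw [findLoopA_eq (c :: t) c (c :: t).length f (by omega) hlt (by omega) hc hfc]
    refine (innerSpec_skip (c :: t) 1 f hb le_rfl ?_).symm
    intro q hq1 hq2 hg
    exact hnone q hq1 hq2 (by rw [good_head _ q hg]; exact hc)
  | none =>
    simp only [findA, hfind]
    refine (innerSpec_none (c :: t) 1 ?_ le_rfl).symm
    intro q hq1 hg
    exact findFromA_none_spec (c :: t) c (c :: t).length 1 (by omega) hfind q hq1
      (good_lt _ q hg) (by rw [good_head _ q hg]; exact hc)

-- A's outer loop, characterized through innerSpec
theorem erfAuxA_none (l : List Char) :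
    ∀ fuel i, (∀ j, i ≤ j → j < l.length → innerSpec (l.drop j) 1 = none) →
      erfAuxA l fuel i = [] := by
  intro fuel
  induction fuel with
  | zero => intro i _; rfl
  | succ fuel ih =>
    intro i h
    simp only [erfAuxA]
    by_cases hi : i < l.length
    · rw [if_pos hi, findA_eq (l.drop i) (by simp; omega), h i le_rfl hi]
      exact ih (i + 1) (fun j hj1 hj2 => h j (by omega) hj2)
    · rw [if_neg hi]

theorem erfAuxA_found (l : List Char) (e : Nat) (v : List Char)
    (he : e < l.length) (hsome : innerSpec (l.drop e) 1 = some v)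
    (hnone : ∀ j, j < e → innerSpec (l.drop j) 1 = none) :
    ∀ fuel i, i ≤ e → l.length ≤ i + fuel → erfAuxA l fuel i = v := by
  intro fuel
  induction fuel with
  | zero => intro i h1 h2; omega
  | succ fuel ih =>
    intro i h1 h2
    simp only [erfAuxA]
    rw [if_pos (by omega : i < l.length), findA_eq (l.drop i) (by simp; omega)]
    by_cases hie : i = e
    · subst hie; rw [hsome]
    · rw [hnone i (by omega)]
      exact ih (i + 1) (by omega) (by omega)

-- ----- B-side model -----

-- the string matches itself shifted by p from position i on
def MatchP (l : List Char) (i p : Nat) : Prop :=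
  ∀ t, i ≤ t → t + p < l.length → l[t]? = l[t + p]?

-- earliest p-periodic start, as computed by B's inner while loop
def EdB (l : List Char) (p : Nat) : Nat := extLoopB l p (l.length - p) (l.length - p)

theorem matchP_mono (l : List Char) (p i j : Nat) (h : i ≤ j) (hm : MatchP l i p) :
    MatchP l j p := fun t ht => hm t (by omega)

theorem extLoopB_le (l : List Char) (p : Nat) :
    ∀ fuel e, extLoopB l p fuel e ≤ e := by
  intro fuel
  induction fuel with
  | zero => intro e; exact le_rfl
  | succ fuel ih =>
    intro e
    simp only [extLoopB]
    split_ifs with h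
    · exact le_trans (ih (e - 1)) (by omega)
    · exact le_rfl

theorem extLoopB_match (l : List Char) (p : Nat) :
    ∀ fuel e, MatchP l e p → MatchP l (extLoopB l p fuel e) p := by
  intro fuel
  induction fuel with
  | zero => intro e h; exact h
  | succ fuel ih =>
    intro e h
    simp only [extLoopB]
    split_ifs with hc
    · refine ih (e - 1) (fun t ht htp => ?_)
      by_cases hte : t = e - 1
      · subst hte
        simpa [show e - 1 + p = e - 1 + p from rfl] using hc.2
      · exact h t (by omega) htp
    · exact h

theorem extLoopB_stop (l : List Char) (p : Nat) :
    ∀ fuel e, e ≤ fuel →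
      (extLoopB l p fuel e = 0 ∨
       l[extLoopB l p fuel e - 1]? ≠ l[extLoopB l p fuel e - 1 + p]?) := by
  intro fuel
  induction fuel with
  | zero => intro e he; left; simp only [extLoopB]; omega
  | succ fuel ih =>
    intro e he
    simp only [extLoopB]
    split_ifs with hc
    · exact ih (e - 1) (by omega)
    · rcases Decidable.em (0 < e) with h0 | h0
      · right; intro hq; exact hc ⟨h0, hq⟩
      · left; omega

theorem edB_le (l : List Char) (p : Nat) : EdB l p ≤ l.length - p :=
  extLoopB_le l p _ _

-- the while loop computes exactly the least p-periodic start
theorem edB_le_iff (l : List Char) (p i : Nat) : EdB l p ≤ i ↔ MatchP l i p := by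
  constructor
  · intro h
    refine matchP_mono l p (EdB l p) i h ?_
    refine extLoopB_match l p _ _ (fun t ht htp => ?_)
    omega
  · intro hm
    by_contra hlt
    rcases extLoopB_stop l p (l.length - p) (l.length - p) le_rfl with h0 | hne
    · exact hlt (by unfold EdB; omega)
    · have hle := edB_le l p
      have h1 : 1 ≤ EdB l p := by omega
      exact hne (hm (EdB l p - 1) (by omega) (by omega))

-- reindexing between suffix indices and absolute indices
theorem reindex (l : List Char) (i p : Nat) (h1 : 1 ≤ p) :
    (∀ j, p ≤ j → j < l.length - i → (l.drop i)[j]? = (l.drop i)[j - p]?) ↔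
      MatchP l i p := by
  constructor
  · intro h t ht htp
    have hj := h (t - i + p) (by omega) (by omega)
    rw [List.getElem?_drop, List.getElem?_drop,
      show i + (t - i + p) = t + p by omega,
      show i + (t - i + p - p) = t by omega] at hj
    exact hj.symm
  · intro hm j hj1 hj2
    have ht := hm (i + j - p) (by omega) (by omega)
    rw [show i + j - p + p = i + j by omega] at ht
    rw [List.getElem?_drop, List.getElem?_drop,
      show i + (j - p) = i + j - p by omega]
    exact ht.symm

-- A's per-suffix "good shift" is exactly B's "valid shift reaching this start"
theorem goodB_iff (l : List Char) (i p : Nat) :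
    GoodB (l.drop i) p ↔ (1 ≤ p ∧ 2 * p ≤ l.length - i ∧ MatchP l i p) := by
  unfold GoodB
  rw [List.length_drop]
  constructor
  · rintro ⟨h1, h2, h3⟩
    refine ⟨h1, h2, (reindex l i p h1).1 ?_⟩
    have := (dropTake_iff (l.drop i) p h1 (by rw [List.length_drop]; omega)).1
    rw [List.length_drop] at this
    exact this h3
  · rintro ⟨h1, h2, h3⟩
    refine ⟨h1, h2, ?_⟩
    have := (dropTake_iff (l.drop i) p h1 (by rw [List.length_drop]; omega)).2
    rw [List.length_drop] at this
    exact this ((reindex l i p h1).2 h3)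

-- invariant of B's fold over p = 1 .. P
def InvB (l : List Char) (P : Nat) : Option (Nat × Nat) → Prop
  | none => ∀ q, 1 ≤ q → q ≤ P → ¬ (EdB l q ≤ l.length - 2 * q)
  | some (e, p0) => 1 ≤ p0 ∧ p0 ≤ P ∧ e = EdB l p0 ∧ e ≤ l.length - 2 * p0 ∧
      (∀ q, 1 ≤ q → q ≤ P → EdB l q ≤ l.length - 2 * q → e ≤ EdB l q) ∧
      (∀ q, 1 ≤ q → q < p0 → EdB l q ≤ l.length - 2 * q → e < EdB l q)

theorem invB_step (l : List Char) (P : Nat) (best : Option (Nat × Nat))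
    (h : InvB l P best) : InvB l (P + 1) (bStepB l.length l best (P + 1)) := by
  have hed : extLoopB l (P + 1) (l.length - (P + 1)) (l.length - (P + 1)) = EdB l (P + 1) := rfl
  cases best with
  | none =>
    simp only [bStepB, hed]
    split_ifs with hc
    · refine ⟨by omega, le_rfl, rfl, hc, ?_, ?_⟩
      · intro q hq1 hq2 hqv
        by_cases hqP : q = P + 1
        · subst hqP; exact le_rfl
        · exact absurd hqv (h q hq1 (by omega))
      · intro q hq1 hq2 hqv
        exact absurd hqv (h q hq1 (by omega))
    · intro q hq1 hq2
      by_cases hqP : q = P + 1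
      · subst hqP; exact hc
      · exact h q hq1 (by omega)
  | some bep =>
    obtain ⟨be, bp⟩ := bep
    obtain ⟨h1, h2, h3, h4, h5, h6⟩ := h
    simp only [bStepB, hed]
    split_ifs with hc
    · refine ⟨by omega, le_rfl, rfl, hc.1, ?_, ?_⟩
      · intro q hq1 hq2 hqv
        by_cases hqP : q = P + 1
        · subst hqP; exact le_rfl
        · exact le_trans (by omega) (h5 q hq1 (by omega) hqv)
      · intro q hq1 hq2 hqv
        exact lt_of_lt_of_le (by omega) (h5 q hq1 (by omega) hqv)
    · refine ⟨h1, by omega, h3, h4, ?_, ?_⟩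
      · intro q hq1 hq2 hqv
        by_cases hqP : q = P + 1
        · subst hqP
          have : ¬ be > EdB l (P + 1) := fun hgt => hc ⟨hqv, hgt⟩
          omega
        · exact h5 q hq1 (by omega) hqv
      · intro q hq1 hq2 hqv
        exact h6 q hq1 hq2 hqv

theorem invB_fold (l : List Char) (k : Nat) :
    InvB l k ((List.range' 1 k).foldl (bStepB l.length l) none) := by
  induction k with
  | zero =>
    intro q hq1 hq2
    omega
  | succ k ih =>
    have hr : List.range' 1 (k + 1) = List.range' 1 k ++ [1 + k] := by
      simpa using List.range'_concat (s := 1) (n := k) (step := 1)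
    rw [hr, List.foldl_append, List.foldl_cons, List.foldl_nil,
      show 1 + k = k + 1 by omega]
    exact invB_step l k _ ih

-- a good shift at j yields a valid processed shift starting no later than j
theorem good_to_valid (l : List Char) (j q : Nat) (hj : j < l.length)
    (hg : GoodB (l.drop j) q) :
    1 ≤ q ∧ q ≤ l.length / 2 ∧ EdB l q ≤ l.length - 2 * q ∧ EdB l q ≤ j := by
  obtain ⟨h1, h2, h3⟩ := (goodB_iff l j q).1 hg
  have hed : EdB l q ≤ j := (edB_le_iff l q j).2 h3
  exact ⟨h1, by omega, by omega, hed⟩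

-- the central equality, at the level of lists
theorem lists_eq (l : List Char) :
    erfAuxA l l.length 0 =
      (match (List.range' 1 (l.length / 2)).foldl (bStepB l.length l) none with
       | none => []
       | some (i, p) => (l.drop i).take p) := by
  have hinv := invB_fold l (l.length / 2)
  cases hfold : (List.range' 1 (l.length / 2)).foldl (bStepB l.length l) none with
  | none =>
    rw [hfold] at hinv
    refine erfAuxA_none l l.length 0 (fun j hj1 hj2 => ?_)
    refine innerSpec_none (l.drop j) 1 (fun q hq1 hg => ?_) le_rfl
    obtain ⟨g1, g2, g3, g4⟩ := good_to_valid l j q hj2 hg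
    exact hinv q g1 g2 g3
  | some ep =>
    obtain ⟨e, p0⟩ := ep
    rw [hfold] at hinv
    obtain ⟨h1, h2, h3, h4, h5, h6⟩ := hinv
    have h2n : 2 * p0 ≤ l.length := by omega
    have hen : e < l.length := by omega
    have hgood : GoodB (l.drop e) p0 := by
      refine (goodB_iff l e p0).2 ⟨h1, by omega, ?_⟩
      exact (edB_le_iff l p0 e).1 (by omega)
    have hmin : ∀ r, 1 ≤ r → r < p0 → ¬ GoodB (l.drop e) r := by
      intro r hr1 hr2 hg
      obtain ⟨g1, g2, g3, g4⟩ := good_to_valid l e r hen hg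
      exact absurd g4 (by have := h6 r g1 hr2 g3; omega)
    have hsome : innerSpec (l.drop e) 1 = some ((l.drop e).take p0) := by
      rw [innerSpec_skip (l.drop e) 1 p0 h1 le_rfl
        (fun q hq1 hq2 => hmin q hq1 hq2)]
      exact innerSpec_good (l.drop e) p0 hgood
    have hnone : ∀ j, j < e → innerSpec (l.drop j) 1 = none := by
      intro j hj
      refine innerSpec_none (l.drop j) 1 (fun q hq1 hg => ?_) le_rfl
      obtain ⟨g1, g2, g3, g4⟩ := good_to_valid l j q (by omega) hg
      have := h5 q g1 g2 g3
      omega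
    exact erfAuxA_found l e ((l.drop e).take p0) hen hsome hnone l.length 0
      (by omega) (by omega)

-- ===== VERDICT (by name: the statement is the Claim_ definition above) =====
theorem endRepFind_spec : Claim_equal_endRepFind := by
  intro str_ _
  unfold Spec_endRepFind endRepFind endRepFind_alt
  rw [lists_eq str_.toList]
  cases (List.range' 1 (str_.toList.length / 2)).foldl (bStepB str_.toList.length str_.toList) none with
  | none => rfl
  | some ep => cases ep; rfl
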